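-- pv_equiv track=rewrite | github.com/NeuralDev-io/arclytics_simcct | services/arclytics/arc_app/models.py | validate_comp_elements
-- ===== SOURCE A (Python) =====
-- from typing import Union, Tuple
--
-- def validate_comp_elements(alloy_comp: list) -> Tuple[bool, list]:
--     """We validate the alloy has all the elements that will be needed by the
--     simulation algorithms using a hashed dictionary as it is much faster.
--
--     Args:
--         alloy_comp: a list of Alloy composition objects (i.e.
--                     {"symbol": "C", "weight": 1.0})
--
--     Returns:
--         A tuple response whether the validation succeeded and the missing
--         elements if it did not.
--     """
--     valid_elements = {
--         'C': False,
--         'Mn': False,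
--         'Ni': False,
--         'Cr': False,
--         'Mo': False,
--         'Si': False,
--         'Co': False,
--         'W': False,
--         'As': False,
--         'Fe': False
--     }
--
--     for el in alloy_comp:
--         if el['symbol'] in valid_elements.keys():
--             valid_elements[el['symbol']] = True
--
--     # all() returns True if all values in the dict are True
--     # If it does not pass, we build up a message and respond.
--     if not all(el is True for el in valid_elements.values()):
--         # We build up a list of missing elements for the response.
--         missing_elem = []
--         for k, v in valid_elements.items():
--             if not v:
--                 missing_elem.append(k)
--         # The validation has failed so we return False and the missing elements
--         return False, missing_elem
--     # The validation has succeeded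
--     return True, []
-- ===== SOURCE B (Python) =====
-- def validate_comp_elements(alloy_comp):
--     """Recursive check over the fixed required-element list: for each required
--     symbol we scan the composition directly; no presence table is built."""
--     def missing_after(required):
--         if not required:
--             return []
--         head = required[0]
--         found = any(el['symbol'] == head for el in alloy_comp)
--         tail = missing_after(required[1:])
--         return tail if found else [head] + tail
--
--     missing = missing_after(
--         ['C', 'Mn', 'Ni', 'Cr', 'Mo', 'Si', 'Co', 'W', 'As', 'Fe'])
--     return (len(missing) == 0, missing)
-- ===== Notes on version B (the rewrite author's own statement) =====
-- stated objective: alternative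
-- what changed: Replaces A's single marking pass over the input into a dict of flags (then an all() scan and a collect loop) by a recursion over the fixed required-element list that runs a separate any() scan of the composition for each required symbol, assembling the missing list on the way out of the recursion; it trades A's O(n+r) single pass for r independent scans.
import Mathlib
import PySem

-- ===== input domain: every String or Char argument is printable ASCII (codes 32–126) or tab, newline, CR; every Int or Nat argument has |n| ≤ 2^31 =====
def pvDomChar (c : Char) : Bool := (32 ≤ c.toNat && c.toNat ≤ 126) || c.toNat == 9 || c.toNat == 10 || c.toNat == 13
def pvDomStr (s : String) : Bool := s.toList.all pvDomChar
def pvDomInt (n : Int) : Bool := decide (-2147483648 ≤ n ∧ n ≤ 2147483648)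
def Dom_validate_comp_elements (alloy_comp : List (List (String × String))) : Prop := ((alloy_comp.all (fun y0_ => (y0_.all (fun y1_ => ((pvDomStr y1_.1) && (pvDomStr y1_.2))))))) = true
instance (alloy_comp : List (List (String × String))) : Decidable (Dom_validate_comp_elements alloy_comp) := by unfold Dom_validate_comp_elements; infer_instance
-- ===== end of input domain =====

-- B drops A's dict of per-element flags (mark in one pass, all()-scan, collect loop) and instead
-- recurses over the fixed required list, scanning the composition once per required symbol
-- (objective: alternative — r independent scans instead of one marking pass).

-- ===== PORT A =====
-- el['symbol'] : first-match lookup in the element's association list (dict);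
-- Pre_ guarantees the key is present, so the "" default is never used.
def pySymbol (el : List (String × String)) : String :=
  (PySem.Dict.mk el).getD "symbol" ""

def validFlags0 : PySem.Dict String Bool :=
  PySem.Dict.mk [("C", false), ("Mn", false), ("Ni", false), ("Cr", false), ("Mo", false),
                 ("Si", false), ("Co", false), ("W", false), ("As", false), ("Fe", false)]

def validate_comp_elements (alloy_comp : List (List (String × String))) : Bool × List String :=
  let valid := alloy_comp.foldl (fun d el =>
    if d.contains (pySymbol el) then d.insert (pySymbol el) true else d) validFlags0
  if !(valid.values.all (fun v => v == true)) then
    (false, valid.items.foldl (fun acc p => if !p.2 then acc ++ [p.1] else acc) [])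
  else
    (true, [])

-- ===== PORT B =====
-- missing_after(required): recursion over the required list; 'found' is Python's
-- any(el['symbol'] == head for el in alloy_comp), an inner scan of the composition.
def missingAfter (alloy_comp : List (List (String × String))) : List String → List String
  | [] => []
  | head :: rest =>
    let found := alloy_comp.any (fun el => pySymbol el == head)
    let tail := missingAfter alloy_comp rest
    if found then tail else head :: tail

def validate_comp_elements_alt (alloy_comp : List (List (String × String))) : Bool × List String :=
  let missing := missingAfter alloy_comp
    ["C", "Mn", "Ni", "Cr", "Mo", "Si", "Co", "W", "As", "Fe"]
  (missing.length == 0, missing)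

-- ===== PRECONDITION & SPEC =====
-- Pre_ excludes exactly the inputs where some element dict has no 'symbol' key:
-- there Python A raises KeyError (and B raises too).
def Pre_validate_comp_elements (alloy_comp : List (List (String × String))) : Prop :=
  (alloy_comp.all (fun el => el.any (fun p => p.1 == "symbol"))) = true
instance (alloy_comp : List (List (String × String))) : Decidable (Pre_validate_comp_elements alloy_comp) := by unfold Pre_validate_comp_elements; infer_instance

def pvWitness_validate_comp_elements : (List (List (String × String))) :=
  [[("symbol", "C"), ("weight", "1.0")], [("symbol", "Fe")]]

def Spec_validate_comp_elements (alloy_comp : List (List (String × String))) (out : Bool × List String) : Prop := out = validate_comp_elements_alt alloy_comp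
instance (alloy_comp : List (List (String × String))) (out : Bool × List String) : Decidable (Spec_validate_comp_elements alloy_comp out) := by unfold Spec_validate_comp_elements; infer_instance

-- ===== CLAIM (what is proved, stated in full; the proofs are below) =====
def Claim_equal_validate_comp_elements : Prop := ∀ (alloy_comp : List (List (String × String))), Dom_validate_comp_elements alloy_comp → Pre_validate_comp_elements alloy_comp → Spec_validate_comp_elements alloy_comp (validate_comp_elements alloy_comp)

-- ===== LEMMAS AND PROOFS =====

def requiredElems : List String := ["C", "Mn", "Ni", "Cr", "Mo", "Si", "Co", "W", "As", "Fe"]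

-- A's marking loop over a flag dict whose keys are R: each flag ends up 'old value OR symbol seen'.
theorem loop_items (R : List String) (syms : List String) (g : String → Bool) :
    (syms.foldl (fun d s => if d.contains s then d.insert s true else d)
        (PySem.Dict.mk (R.map (fun k => (k, g k))))).items
      = R.map (fun k => (k, g k || syms.contains k)) := by
  induction syms generalizing g with
  | nil => simp
  | cons s rest ih =>
    rw [List.foldl_cons]
    by_cases hs : s ∈ R
    · have hc : (PySem.Dict.mk (R.map (fun k => (k, g k)))).contains s = true := by
        rw [PySem.Dict.contains_mk, List.any_map]
        simp only [List.any_eq_true]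
        exact ⟨s, hs, by simp⟩
      have hins : (PySem.Dict.mk (R.map (fun k => (k, g k)))).insert s true
          = PySem.Dict.mk (R.map (fun k => (k, if k = s then true else g k))) := by
        apply PySem.Dict.ext
        rw [PySem.Dict.items_insert_of_contains _ _ hc]
        rw [List.map_map]
        apply List.map_congr_left
        intro k _
        by_cases hk : k = s <;> simp [hk]
      rw [hc, if_pos rfl, hins, ih]
      apply List.map_congr_left
      intro k _
      by_cases hk : k = s <;> simp [hk]
    · have hc : (PySem.Dict.mk (R.map (fun k => (k, g k)))).contains s = false := by
        rw [PySem.Dict.contains_mk, List.any_map]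
        simp only [List.any_eq_false]
        intro k hk
        simp only [Function.comp, beq_iff_eq]
        exact fun h => hs (h ▸ hk)
      rw [hc]
      simp only [Bool.false_eq_true, if_false]
      rw [ih]
      apply List.map_congr_left
      intro k hk
      have : k ≠ s := fun h => hs (h ▸ hk)
      simp [this]

theorem validFlags0_eq : validFlags0 = PySem.Dict.mk (requiredElems.map (fun k => (k, false))) := by
  decide

theorem items_final (alloy_comp : List (List (String × String))) :
    (alloy_comp.foldl (fun d el =>
        if d.contains (pySymbol el) then d.insert (pySymbol el) true else d) validFlags0).items
      = requiredElems.map (fun k => (k, (alloy_comp.map pySymbol).contains k)) := by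
  have h := List.foldl_map (f := pySymbol)
    (g := fun (d : PySem.Dict String Bool) s => if d.contains s then d.insert s true else d)
    (l := alloy_comp) (init := PySem.Dict.mk (requiredElems.map (fun k => (k, false))))
  rw [validFlags0_eq, ← h, loop_items]
  simp only [Bool.false_or]

-- B's inner any-scan computes membership of the required symbol among the symbols.
theorem any_eq_contains (alloy_comp : List (List (String × String))) (e : String) :
    (alloy_comp.any (fun el => pySymbol el == e)) = (alloy_comp.map pySymbol).contains e := by
  induction alloy_comp with
  | nil => rfl
  | cons h t ih =>
    simp only [List.any_cons, List.map_cons, List.contains_cons, ih]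
    rw [Bool.beq_comm]

-- B's recursion over the required list is the ordered sublist of symbols not present.
theorem missingAfter_eq_filter (alloy_comp : List (List (String × String))) (R : List String) :
    missingAfter alloy_comp R
      = R.filter (fun e => !((alloy_comp.map pySymbol).contains e)) := by
  induction R with
  | nil => rfl
  | cons h t ih =>
    rw [missingAfter]
    simp only [any_eq_contains, ih, List.filter_cons]
    cases hc : (alloy_comp.map pySymbol).contains h <;> simp

-- ===== VERDICT (by name: the statement is the Claim_ definition above) =====
theorem validate_comp_elements_spec : Claim_equal_validate_comp_elements := by
  intro alloy_comp _ _
  unfold Spec_validate_comp_elements validate_comp_elements validate_comp_elements_alt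
  have hitems := items_final alloy_comp
  set syms := alloy_comp.map pySymbol with hsyms
  set valid := alloy_comp.foldl (fun d el =>
      if d.contains (pySymbol el) then d.insert (pySymbol el) true else d) validFlags0 with hvalid
  have hvals : valid.values = requiredElems.map (fun k => syms.contains k) := by
    show valid.items.map (·.2) = _
    rw [hitems, List.map_map]
    rfl
  have hall : valid.values.all (fun v => v == true)
      = requiredElems.all (fun k => syms.contains k) := by
    rw [hvals, List.all_map]
    simp only [Function.comp_def, beq_true]
  have hmiss : valid.items.foldl (fun acc p => if !p.2 then acc ++ [p.1] else acc) []
      = requiredElems.filter (fun e => !(syms.contains e)) := by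
    rw [PySem.List.foldl_append_if (fun (q : String × Bool) => !q.2) (fun q => q.1) valid.items [],
      hitems, List.filter_map, List.map_map,
      show ((fun (q : String × Bool) => !q.2) ∘ (fun k => (k, syms.contains k)))
          = (fun k => !(syms.contains k)) from rfl,
      show ((fun (q : String × Bool) => q.1) ∘ (fun k => (k, syms.contains k)))
          = (fun (k : String) => k) from rfl]
    simp
  have hB : missingAfter alloy_comp ["C", "Mn", "Ni", "Cr", "Mo", "Si", "Co", "W", "As", "Fe"]
      = requiredElems.filter (fun e => !(syms.contains e)) :=
    missingAfter_eq_filter alloy_comp requiredElems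
  simp only []
  rw [hmiss, hall, hB]
  set m := requiredElems.filter (fun e => !(syms.contains e)) with hm
  cases hA : requiredElems.all (fun k => syms.contains k) with
  | true =>
    have hnil : m = [] := by
      rw [hm, List.filter_eq_nil_iff]
      intro e he
      have := (List.all_eq_true.mp hA) e he
      simpa using this
    simp [hnil]
  | false =>
    obtain ⟨e, he, hc⟩ := List.all_eq_false.mp hA
    have hem : e ∈ m := by
      rw [hm]
      exact List.mem_filter.mpr ⟨he, by simpa using hc⟩
    have hlen : (m.length == 0) = false := by
      cases hmv : m with
      | nil => rw [hmv] at hem; cases hem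
      | cons a t => rfl
    simp [hlen]
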